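-- pv_equiv track=rewrite | github.com/daniel-reich/ubiquitous-fiesta | SHdu4GwBQehhDm4xT_5.py | freed_prisoners
-- ===== SOURCE A (Python) =====
-- def freed_prisoners(prison):
--   pos = 0
--   count = 0
--   length = len(prison)
--   if prison[0] != 1:
--     return 0
--   while pos < length:
--     for i in range(pos, length):
--       if prison[i] == 1:
--         prison = [1 - x for x in prison]
--         pos = i + 1
--         count = count + 1
--         break
--       else:
--         pos = i + 1
--   return count
-- ===== SOURCE B (Python) =====
-- def freed_prisoners(prison):
--     if prison[0] != 1:
--         return 0
--     count = 0
--     for x in prison: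
--         if x == 1 - count % 2:
--             count += 1
--     return count
-- ===== Notes on version B (the rewrite author's own statement) =====
-- stated objective: simpler
-- what changed: Instead of rescanning and rebuilding the whole flipped list after each freed prisoner, B makes one pass tracking flip parity via the freed count (an element currently reads 1 iff it equals 1 - count % 2).
import Mathlib
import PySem

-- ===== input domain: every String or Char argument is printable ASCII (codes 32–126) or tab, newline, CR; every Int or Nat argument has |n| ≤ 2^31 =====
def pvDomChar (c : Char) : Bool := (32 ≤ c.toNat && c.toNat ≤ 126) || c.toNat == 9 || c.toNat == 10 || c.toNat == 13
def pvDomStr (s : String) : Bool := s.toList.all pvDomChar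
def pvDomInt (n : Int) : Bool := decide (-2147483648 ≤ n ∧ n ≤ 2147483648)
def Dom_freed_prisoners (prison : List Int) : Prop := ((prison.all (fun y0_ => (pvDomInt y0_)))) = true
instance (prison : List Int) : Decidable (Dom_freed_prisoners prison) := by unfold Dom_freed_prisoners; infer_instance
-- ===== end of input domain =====

-- B replaces A's repeated whole-list rebuild-and-flip with a single pass tracking flip parity in the freed count (objective: simpler).

-- ===== PORT A =====
-- inner `for i in range(pos, length)` loop of A: returns the (prison, pos, count)
-- state at the moment the for-loop breaks or completes
def pvAInner (prison : List Int) (i : Nat) (length : Nat) (count : Int) :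
    List Int × Nat × Int :=
  if _h : i < length then
    if prison.getD i 0 = 1 then  -- prison[i]; in range since i < length = len(prison)
      (prison.map (fun x => 1 - x), i + 1, count + 1)
    else
      pvAInner prison (i + 1) length count
  else
    (prison, i, count)
termination_by length - i

-- the while-loop of A needs: the inner for-loop strictly advances pos
theorem pvAInner_pos_lt (prison : List Int) (i length : Nat) (count : Int)
    (h : i < length) : i < (pvAInner prison i length count).2.1 := by
  rw [pvAInner]
  rw [dif_pos h]
  split
  · simp
  · by_cases h2 : i + 1 < length
    · have := pvAInner_pos_lt prison (i + 1) length count h2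
      omega
    · rw [pvAInner, dif_neg h2]
      simp
termination_by length - i

-- `while pos < length` loop of A
def pvAWhile (prison : List Int) (pos length : Nat) (count : Int) : Int :=
  if h : pos < length then
    let r := pvAInner prison pos length count
    pvAWhile r.1 r.2.1 length r.2.2
  else count
termination_by length - pos
decreasing_by
  have := pvAInner_pos_lt prison pos length count h
  omega

def freed_prisoners (prison : List Int) : Int :=
  let length := prison.length
  match PySem.List.pyGet? prison 0 with  -- prison[0]; none = IndexError, excluded by Pre_
  | none => 0
  | some v =>
    if v ≠ 1 then 0
    else pvAWhile prison 0 length 0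

-- ===== PORT B =====
def freed_prisoners_alt (prison : List Int) : Int :=
  match PySem.List.pyGet? prison 0 with  -- prison[0]; none = IndexError, excluded by Pre_
  | none => 0
  | some v =>
    if v ≠ 1 then 0
    else prison.foldl
      (fun count x => if x = 1 - PySem.Int.mod count 2 then count + 1 else count) 0

-- ===== PRECONDITION & SPEC =====
-- A (and B) raise IndexError on the empty list (prison[0]); only those inputs are excluded.
def Pre_freed_prisoners (prison : List Int) : Prop := prison ≠ []
instance (prison : List Int) : Decidable (Pre_freed_prisoners prison) := by
  unfold Pre_freed_prisoners; infer_instance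
def pvWitness_freed_prisoners : List Int := [1, 0, 1]

def Spec_freed_prisoners (prison : List Int) (out : Int) : Prop := out = freed_prisoners_alt prison
instance (prison : List Int) (out : Int) : Decidable (Spec_freed_prisoners prison out) := by unfold Spec_freed_prisoners; infer_instance

-- ===== CLAIM (what is proved, stated in full; the proofs are below) =====
def Claim_equal_freed_prisoners : Prop := ∀ (prison : List Int), Dom_freed_prisoners prison → Pre_freed_prisoners prison → Spec_freed_prisoners prison (freed_prisoners prison)

-- ===== LEMMAS AND PROOFS =====

-- B's loop step
def pvBStep (count x : Int) : Int :=
  if x = 1 - PySem.Int.mod count 2 then count + 1 else count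

-- Abstract description of A's while loop over the suffix still to scan:
-- free the first 1, flip the rest, continue.
def pvS : List Int → Int → Int
  | [], c => c
  | x :: t, c =>
    if x = 1 then pvS (t.map (fun y => 1 - y)) (c + 1) else pvS t c
termination_by l => l.length
decreasing_by all_goals simp [List.length_map]

-- A's while loop computes pvS of the not-yet-scanned suffix
theorem pvAWhile_shift (p : List Int) (pos : Nat) (c : Int)
    (h : pos < p.length) (hne : p.getD pos 0 ≠ 1) :
    pvAWhile p pos p.length c = pvAWhile p (pos + 1) p.length c := by
  rw [pvAWhile, dif_pos h]
  rw [pvAInner, dif_pos h, if_neg hne]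
  by_cases h2 : pos + 1 < p.length
  · conv_rhs => rw [pvAWhile, dif_pos h2]
  · rw [pvAInner, dif_neg h2]

theorem pvAWhile_eq_pvS (n : Nat) :
    ∀ (p : List Int) (pos : Nat) (c : Int), p.length - pos = n →
      pvAWhile p pos p.length c = pvS (p.drop pos) c := by
  induction n with
  | zero =>
    intro p pos c hn
    rw [pvAWhile, dif_neg (by omega)]
    rw [List.drop_eq_nil_of_le (by omega)]
    rw [pvS]
  | succ n ih =>
    intro p pos c hn
    have h : pos < p.length := by omega
    have hdrop : p.drop pos = p[pos] :: p.drop (pos + 1) :=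
      List.drop_eq_getElem_cons h
    by_cases h1 : p[pos] = 1
    · rw [pvAWhile, dif_pos h]
      rw [pvAInner, dif_pos h, if_pos (by rw [List.getD_eq_getElem _ _ h]; exact h1)]
      have hlen : (p.map (fun x => 1 - x)).length = p.length := List.length_map ..
      have := ih (p.map (fun x => 1 - x)) (pos + 1) (c + 1) (by omega)
      rw [hlen] at this
      rw [this, hdrop, pvS, if_pos h1, ← List.map_drop]
    · rw [pvAWhile_shift p pos c h (by rw [List.getD_eq_getElem _ _ h]; exact h1)]
      rw [ih p (pos + 1) c (by omega)]
      rw [hdrop, pvS, if_neg h1]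

-- flip the whole list once for each freed prisoner so far: only the parity matters
def pvFlipPow (c : Int) (l : List Int) : List Int :=
  if c % 2 = 0 then l else l.map (fun y => 1 - y)

theorem pvS_eq_foldl (l : List Int) :
    ∀ c : Int, 0 ≤ c → pvS (pvFlipPow c l) c = l.foldl pvBStep c := by
  induction l with
  | nil =>
    intro c _
    unfold pvFlipPow
    split
    · rw [pvS]; rfl
    · rw [List.map_nil, pvS]; rfl
  | cons x t ih =>
    intro c hc
    have hmod : PySem.Int.mod c 2 = c % 2 := PySem.Int.mod_eq_emod_of_pos (by omega)
    by_cases hp : c % 2 = 0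
    · rw [pvFlipPow, if_pos hp]
      rw [pvS]
      by_cases h1 : x = 1
      · rw [if_pos h1]
        have h2 : (c + 1) % 2 ≠ 0 := by omega
        have := ih (c + 1) (by omega)
        rw [pvFlipPow, if_neg h2] at this
        rw [this, List.foldl_cons, pvBStep, if_pos (by rw [hmod, hp]; omega)]
      · rw [if_neg h1]
        have := ih c hc
        rw [pvFlipPow, if_pos hp] at this
        rw [this, List.foldl_cons, pvBStep, if_neg (by rw [hmod, hp]; omega)]
    · rw [pvFlipPow, if_neg hp]
      rw [List.map_cons, pvS]
      have hp1 : c % 2 = 1 := Int.emod_two_eq c |>.resolve_left hp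
      by_cases h0 : x = 0
      · rw [if_pos (by omega)]
        have h2 : (c + 1) % 2 = 0 := by omega
        have := ih (c + 1) (by omega)
        rw [pvFlipPow, if_pos h2] at this
        rw [List.map_map]
        have hmm : (t.map (fun y => 1 - y)).map (fun y => 1 - y) = t := by
          rw [List.map_map]
          have : ((fun y => 1 - y) ∘ fun y => (1:Int) - y) = id := by
            funext y; simp
          rw [this, List.map_id]
        rw [List.map_map] at hmm
        rw [hmm, this, List.foldl_cons, pvBStep, if_pos (by rw [hmod, hp1]; omega)]
      · rw [if_neg (by omega)]
        have := ih c hc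
        rw [pvFlipPow, if_neg hp] at this
        rw [this, List.foldl_cons, pvBStep, if_neg (by rw [hmod, hp1]; omega)]

-- ===== VERDICT (by name: the statement is the Claim_ definition above) =====
theorem freed_prisoners_spec : Claim_equal_freed_prisoners := by
  intro prison _ hpre
  unfold Spec_freed_prisoners
  match prison, hpre with
  | x :: t, _ =>
    simp only [freed_prisoners, freed_prisoners_alt, PySem.List.pyGet?_zero_cons]
    by_cases h1 : x = 1
    · simp only [h1, ne_eq, not_true_eq_false, if_false]
      have h := pvAWhile_eq_pvS ((1 :: t).length) ((1 : Int) :: t) 0 0 (by omega)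
      rw [List.drop_zero] at h
      rw [h]
      have hf := pvS_eq_foldl ((1 : Int) :: t) 0 (by omega)
      rw [pvFlipPow, if_pos (by decide)] at hf
      exact hf
    · simp only [ne_eq, h1, not_false_eq_true, if_true]
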